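-- pv_equiv track=rewrite | github.com/wolkerzheng/sent_filter | TDTReader.py | convert_bnd_to_segeval_format
-- ===== SOURCE A (Python) =====
-- def convert_bnd_to_segeval_format(ref_bnds, hyp_bnds):
--     ref_eval = []
--     hyp_eval = []
--
--     count_hyp = 0
--     count_ref = 0
--     for i, j in zip(hyp_bnds,ref_bnds):
--         if i == 1:
--             hyp_eval.append(count_hyp+1)
--             count_hyp = 0
--         else:
--             count_hyp += 1
--
--         if j == 1:
--             ref_eval.append(count_ref+1)
--             count_ref = 0
--         else:
--             count_ref += 1
--
--     return ref_eval, hyp_eval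
-- ===== SOURCE B (Python) =====
-- def convert_bnd_to_segeval_format(ref_bnds, hyp_bnds):
--     n = min(len(ref_bnds), len(hyp_bnds))
--
--     def seg_lengths(bnds):
--         idxs = [i for i, x in enumerate(bnds[:n]) if x == 1]
--         prev = -1
--         out = []
--         for i in idxs:
--             out.append(i - prev)
--             prev = i
--         return out
--
--     return seg_lengths(ref_bnds), seg_lengths(hyp_bnds)
-- ===== Notes on version B (the rewrite author's own statement) =====
-- stated objective: alternative
-- what changed: Replaces the interleaved zip loop with per-counter resets by two independent index-then-difference passes: collect the positions of 1s in the first min-length prefix and emit consecutive index differences starting from -1.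
import Mathlib
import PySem

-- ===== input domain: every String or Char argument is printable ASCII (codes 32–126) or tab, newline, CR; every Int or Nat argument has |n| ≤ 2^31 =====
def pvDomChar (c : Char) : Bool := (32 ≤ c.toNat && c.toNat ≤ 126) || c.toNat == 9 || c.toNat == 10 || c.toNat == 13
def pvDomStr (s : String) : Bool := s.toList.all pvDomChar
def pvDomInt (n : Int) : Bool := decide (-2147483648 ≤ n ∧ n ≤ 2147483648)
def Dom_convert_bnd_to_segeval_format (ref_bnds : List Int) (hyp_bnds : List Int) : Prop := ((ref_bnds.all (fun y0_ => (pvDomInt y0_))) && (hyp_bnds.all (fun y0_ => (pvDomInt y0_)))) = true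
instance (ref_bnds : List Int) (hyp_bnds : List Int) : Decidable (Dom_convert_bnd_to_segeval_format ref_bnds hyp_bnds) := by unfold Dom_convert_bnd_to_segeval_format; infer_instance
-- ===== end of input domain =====

-- B replaces A's interleaved zip loop with running reset counters by two independent
-- index-then-difference passes (positions of 1s, consecutive differences from -1); alternative decomposition.

-- ===== PORT A =====
-- state is (ref_eval, hyp_eval, count_hyp, count_ref); loop over zip(hyp_bnds, ref_bnds)
def convert_bnd_to_segeval_format (ref_bnds : List Int) (hyp_bnds : List Int) : List Int × List Int :=
  let st := (hyp_bnds.zip ref_bnds).foldl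
    (fun (s : List Int × List Int × Int × Int) (ij : Int × Int) =>
      let hy := if ij.1 == 1 then (s.2.1 ++ [s.2.2.1 + 1], (0 : Int)) else (s.2.1, s.2.2.1 + 1)
      let rf := if ij.2 == 1 then (s.1 ++ [s.2.2.2 + 1], (0 : Int)) else (s.1, s.2.2.2 + 1)
      (rf.1, hy.1, hy.2, rf.2))
    ([], [], 0, 0)
  (st.1, st.2.1)

-- ===== PORT B =====
-- seg_lengths helper of Source B: indices of 1s in bnds[:n], then consecutive differences from prev = -1
def pvSegLengths (bnds : List Int) (n : Nat) : List Int :=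
  -- bnds[:n] with a natural bound is take n (PySem.List.slice_to_natCast)
  let idxs : List Int := ((PySem.List.enumerate (bnds.take n)).filter (fun p => p.2 == 1)).map (·.1)
  (idxs.foldl (fun (s : Int × List Int) i => (i, s.2 ++ [i - s.1])) (-1, [])).2

def convert_bnd_to_segeval_format_alt (ref_bnds : List Int) (hyp_bnds : List Int) : List Int × List Int :=
  let n : Nat := min ref_bnds.length hyp_bnds.length
  (pvSegLengths ref_bnds n, pvSegLengths hyp_bnds n)

-- ===== PRECONDITION & SPEC =====
def Spec_convert_bnd_to_segeval_format (ref_bnds : List Int) (hyp_bnds : List Int) (out : List Int × List Int) : Prop := out = convert_bnd_to_segeval_format_alt ref_bnds hyp_bnds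
instance (ref_bnds : List Int) (hyp_bnds : List Int) (out : List Int × List Int) : Decidable (Spec_convert_bnd_to_segeval_format ref_bnds hyp_bnds out) := by unfold Spec_convert_bnd_to_segeval_format; infer_instance

-- ===== CLAIM (what is proved, stated in full; the proofs are below) =====
def Claim_equal_convert_bnd_to_segeval_format : Prop := ∀ (ref_bnds : List Int) (hyp_bnds : List Int), Dom_convert_bnd_to_segeval_format ref_bnds hyp_bnds → Spec_convert_bnd_to_segeval_format ref_bnds hyp_bnds (convert_bnd_to_segeval_format ref_bnds hyp_bnds)

-- ===== LEMMAS AND PROOFS =====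

-- common specification: segment lengths of a list given current running count c
def pvSeg : List Int → Int → List Int
  | [], _ => []
  | x :: t, c => if x == 1 then (c + 1) :: pvSeg t 0 else pvSeg t (c + 1)

-- final counter of a counting pass (needed to state A's fold invariant exactly)
def pvFc : List Int → Int → Int
  | [], c => c
  | x :: t, c => pvFc t (if x == 1 then 0 else c + 1)

theorem pvSplitA : ∀ (hyp ref : List Int) (re he : List Int) (ch cr : Int),
    (hyp.zip ref).foldl
      (fun (s : List Int × List Int × Int × Int) (ij : Int × Int) =>
        let hy := if ij.1 == 1 then (s.2.1 ++ [s.2.2.1 + 1], (0 : Int)) else (s.2.1, s.2.2.1 + 1)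
        let rf := if ij.2 == 1 then (s.1 ++ [s.2.2.2 + 1], (0 : Int)) else (s.1, s.2.2.2 + 1)
        (rf.1, hy.1, hy.2, rf.2))
      (re, he, ch, cr)
    = (re ++ pvSeg (ref.take hyp.length) cr, he ++ pvSeg (hyp.take ref.length) ch,
       pvFc (hyp.take ref.length) ch, pvFc (ref.take hyp.length) cr) := by
  intro hyp
  induction hyp with
  | nil => intro ref re he ch cr; simp [pvSeg, pvFc]
  | cons a hs ih =>
    intro ref re he ch cr
    cases ref with
    | nil => simp [pvSeg, pvFc]
    | cons b rs =>
      simp only [List.zip_cons_cons, List.foldl_cons, List.length_cons, List.take_succ_cons]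
      rw [ih]
      by_cases ha : a == 1 <;> by_cases hb : b == 1 <;>
        simp [ha, hb, pvSeg, pvFc, List.append_assoc]

theorem pvDiffFold : ∀ (xs : List Int) (k prev : Int) (acc : List Int),
    ((((PySem.List.enumerate xs k).filter (fun p => p.2 == 1)).map (·.1)).foldl
      (fun (s : Int × List Int) i => (i, s.2 ++ [i - s.1])) (prev, acc)).2
    = acc ++ pvSeg xs (k - prev - 1) := by
  intro xs
  induction xs with
  | nil => intro k prev acc; simp [PySem.List.enumerate_nil, pvSeg]
  | cons x t ih =>
    intro k prev acc
    rw [PySem.List.enumerate_cons]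
    by_cases hx : x == 1
    · simp only [List.filter_cons, hx, if_true, List.map_cons, List.foldl_cons]
      rw [ih]
      simp [pvSeg, hx, List.append_assoc]
    · simp only [List.filter_cons, hx, Bool.false_eq_true, if_false]
      rw [ih]
      simp [pvSeg, hx]
      congr 1
      ring

theorem pvSegLengths_eq (bnds : List Int) (n : Nat) :
    pvSegLengths bnds n = pvSeg (bnds.take n) 0 := by
  unfold pvSegLengths
  rw [pvDiffFold]
  norm_num

theorem pvTakeMin {α : Type} (xs : List α) (m : Nat) :
    xs.take (min xs.length m) = xs.take m := by
  rcases Nat.le_total m xs.length with h | h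
  · rw [Nat.min_eq_right h]
  · rw [Nat.min_eq_left h, List.take_length, List.take_of_length_le h]

-- ===== VERDICT (by name: the statement is the Claim_ definition above) =====
theorem convert_bnd_to_segeval_format_spec : Claim_equal_convert_bnd_to_segeval_format := by
  intro ref hyp _
  show _ = _
  unfold convert_bnd_to_segeval_format convert_bnd_to_segeval_format_alt
  rw [pvSplitA]
  simp only [pvSegLengths_eq]
  rw [pvTakeMin, Nat.min_comm, pvTakeMin]
  simp
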